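-- pv_equiv track=rewrite | github.com/alexandraback/datacollection | solutions_5631989306621952_1/Python/Simonsch/prob2a.py | f
-- ===== SOURCE A (Python) =====
-- def f(line):
--     if len(line) < 2:
--         return line
--     pivot = max(line)
--     results = []
--     for i in range(0, len(line)):
--         j = len(line) - i - 1
--         if line[j] == pivot:
--             results.append(pivot + f(line[:j]) + line[(j+1):])
--             break
--     return max(results)
-- ===== SOURCE B (Python) =====
-- def f(line):
--     # single pass: prefix-maxima records go to the front (reversed), the rest keep order
--     records = []
--     others = []
--     cur = None
--     for ch in line:
--         if cur is None or ch >= cur: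
--             records.append(ch)
--             cur = ch
--         else:
--             others.append(ch)
--     return ''.join(reversed(records)) + ''.join(others)
-- ===== Notes on version B (the rewrite author's own statement) =====
-- stated objective: faster
-- what changed: A recursively extracts the last occurrence of the maximum char and recurses on the prefix (quadratic); B does one left-to-right pass collecting the running prefix-maxima (records) and the remaining chars, returning reversed records followed by the rest.
import Mathlib
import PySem

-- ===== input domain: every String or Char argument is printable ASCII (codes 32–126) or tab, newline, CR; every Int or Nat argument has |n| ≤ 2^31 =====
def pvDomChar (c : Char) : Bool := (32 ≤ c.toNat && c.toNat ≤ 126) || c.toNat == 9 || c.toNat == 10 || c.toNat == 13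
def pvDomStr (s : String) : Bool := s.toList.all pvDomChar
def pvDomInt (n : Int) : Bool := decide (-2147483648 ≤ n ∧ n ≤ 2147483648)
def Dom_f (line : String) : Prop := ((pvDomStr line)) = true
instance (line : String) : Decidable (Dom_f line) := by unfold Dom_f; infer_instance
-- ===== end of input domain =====

-- B replaces A's recursive last-max extraction with a single linear pass over prefix maxima.

-- ===== PORT A =====
-- A's inner loop: i = 0,1,2,…; j = len-i-1; stop at the first j (from the right) with l[j] = pivot.
def fFind (l : List Char) (pivot : Char) (i : Nat) : Option Nat :=
  if i < l.length then
    if l[l.length - i - 1]? = some pivot then some (l.length - i - 1)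
    else fFind l pivot (i + 1)
  else none
termination_by l.length - i

-- what the loop guarantees about the index it returns (cited by the termination proof below)
theorem fFind_spec_aux (l : List Char) (pivot : Char) (j : Nat) :
    ∀ n i, l.length - i ≤ n → fFind l pivot i = some j →
      l[j]? = some pivot ∧ j < l.length - i ∧
        ∀ k, j < k → k < l.length - i → l[k]? ≠ some pivot := by
  intro n
  induction n with
  | zero =>
    intro i hni h
    unfold fFind at h
    rw [if_neg (by omega)] at h
    cases h
  | succ n ihn =>
    intro i hni h
    unfold fFind at h
    split at h
    · rename_i hi
      split at h
      · rename_i hp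
        obtain rfl := Option.some.inj h
        exact ⟨hp, by omega, fun k hk1 hk2 => absurd hk2 (by omega)⟩
      · rename_i hp
        obtain ⟨h1, h2, h3⟩ := ihn (i + 1) (by omega) h
        refine ⟨h1, by omega, fun k hk1 hk2 => ?_⟩
        by_cases hk : k = l.length - i - 1
        · subst hk; exact hp
        · exact h3 k hk1 (by omega)
    · cases h

theorem fFind_lt {l : List Char} {pivot : Char} {j : Nat}
    (h : fFind l pivot 0 = some j) : j < l.length := by
  have := (fFind_spec_aux l pivot j l.length 0 (by omega) h).2.1
  omega

def fListA (l : List Char) : List Char :=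
  if l.length < 2 then l
  else
    match PySem.List.max? l (fun y => y) with
    | none => l          -- unreachable: l is nonempty here (max(line) cannot raise)
    | some pivot =>
      match hj : fFind l pivot 0 with
      | none => []       -- unreachable: the loop always finds the maximum (results never empty)
      | some j => pivot :: (fListA (l.take j) ++ l.drop (j + 1))
termination_by l.length
decreasing_by
  have := fFind_lt hj
  simp
  omega

def f (line : String) : String := String.mk (fListA line.toList)

-- ===== PORT B =====
-- one step of B's loop: record ch if cur is None or cur ≤ ch, else keep it among the others
def stepB (acc : List Char × List Char × Option Char) (ch : Char) :
    List Char × List Char × Option Char :=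
  match acc with
  | (r, o, cur) =>
    if cur.all (fun c => c ≤ ch) then (r ++ [ch], o, some ch) else (r, o ++ [ch], cur)

def f_alt (line : String) : String :=
  match line.toList.foldl stepB ([], [], none) with
  | (records, others, _) => String.mk (records.reverse ++ others)

-- ===== PRECONDITION & SPEC =====
def Spec_f (line : String) (out : String) : Prop := out = f_alt line
instance (line : String) (out : String) : Decidable (Spec_f line out) := by unfold Spec_f; infer_instance

-- ===== CLAIM (what is proved, stated in full; the proofs are below) =====
def Claim_equal_f : Prop := ∀ (line : String), Dom_f line → Spec_f line (f line)

-- ===== LEMMAS AND PROOFS =====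

theorem fFind_none_aux (l : List Char) (pivot : Char) :
    ∀ n i, l.length - i ≤ n → fFind l pivot i = none →
      ∀ k, k < l.length - i → l[k]? ≠ some pivot := by
  intro n
  induction n with
  | zero => intro i hni _ k hk; omega
  | succ n ihn =>
    intro i hni h
    unfold fFind at h
    split at h
    · rename_i hi
      split at h
      · cases h
      · rename_i hp
        intro k hk
        by_cases hk' : k = l.length - i - 1
        · subst hk'; exact hp
        · exact ihn (i + 1) (by omega) h k (by omega)
    · rename_i hi
      intro k hk
      omega

-- after the state holds the running max m, every smaller char goes to 'others'
theorem foldl_stepB_small {s : List Char} {m : Char} (hs : ∀ c ∈ s, c < m) :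
    ∀ r o, s.foldl stepB (r, o, some m) = (r, o ++ s, some m) := by
  induction s with
  | nil => intro r o; simp
  | cons x t ih =>
    intro r o
    have hx : x < m := hs x (by simp)
    have hrest : ∀ c ∈ t, c < m := fun c hc => hs c (by simp [hc])
    simp only [List.foldl_cons, stepB]
    rw [if_neg (by simp [not_le.mpr hx])]
    rw [ih hrest r (o ++ [x])]
    simp

-- the third component is the initial cur or some element of the processed list
theorem foldl_stepB_cur (l : List Char) :
    ∀ r o cur0, (l.foldl stepB (r, o, cur0)).2.2 = cur0 ∨
      ∃ c ∈ l, (l.foldl stepB (r, o, cur0)).2.2 = some c := by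
  induction l with
  | nil => intro r o cur0; simp
  | cons x t ih =>
    intro r o cur0
    simp only [List.foldl_cons, stepB]
    split
    · rcases ih (r ++ [x]) o (some x) with h | ⟨c, hc, h⟩
      · exact Or.inr ⟨x, by simp, h⟩
      · exact Or.inr ⟨c, by simp [hc], h⟩
    · rcases ih r (o ++ [x]) cur0 with h | ⟨c, hc, h⟩
      · exact Or.inl h
      · exact Or.inr ⟨c, by simp [hc], h⟩

theorem fListA_short {l : List Char} (h : l.length < 2) : fListA l = l := by
  rw [fListA]; simp [h]

-- main invariant: A's result = reversed records ++ others, for B's fold from the empty state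
theorem fListA_eq (l : List Char) :
    fListA l = (l.foldl stepB ([], [], none)).1.reverse ++ (l.foldl stepB ([], [], none)).2.1 := by
  induction hn : l.length using Nat.strong_induction_on generalizing l with
  | _ n ih =>
    subst hn
    by_cases hlen : l.length < 2
    · rw [fListA_short hlen]
      match l, hlen with
      | [], _ => simp
      | [x], _ => simp [stepB]
    · have hne : l ≠ [] := by intro h; subst h; simp at hlen
      obtain ⟨pivot, hpiv⟩ : ∃ p, PySem.List.max? l (fun y => y) = some p := by
        cases hm : PySem.List.max? l (fun y => y) with
        | none => exact absurd ((PySem.List.max?_eq_none_iff l (fun y => y)).mp hm) hne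
        | some p => exact ⟨p, rfl⟩
      have hmax : ∀ y ∈ l, y ≤ pivot := by
        intro y hy
        simpa using PySem.List.max?_isMax hpiv y hy
      obtain ⟨j, hj⟩ : ∃ j, fFind l pivot 0 = some j := by
        cases hf : fFind l pivot 0 with
        | none =>
          exfalso
          have hmem : pivot ∈ l := PySem.List.max?_mem hpiv
          obtain ⟨k, hk, hkv⟩ := List.mem_iff_getElem.mp hmem
          exact fFind_none_aux l pivot l.length 0 (by omega) hf k (by omega) (by simp [hk, hkv])
        | some j => exact ⟨j, rfl⟩
      obtain ⟨hjv, hjlt', hafter⟩ := fFind_spec_aux l pivot j l.length 0 (by omega) hj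
      simp only [Nat.sub_zero] at hjlt' hafter
      have hjlt : j < l.length := hjlt'
      have hjget : l[j]'hjlt = pivot := by
        rw [List.getElem?_eq_getElem hjlt] at hjv
        exact Option.some.inj hjv
      have hstep : (match hj' : fFind l pivot 0 with
          | none => ([] : List Char)
          | some j' => pivot :: (fListA (l.take j') ++ l.drop (j' + 1))) =
          pivot :: (fListA (l.take j) ++ l.drop (j + 1)) := by
        split
        · rename_i h'; rw [hj] at h'; cases h'
        · rename_i j' h'; rw [hj] at h'; cases Option.some.inj h'; rfl
      have heq : fListA l = pivot :: (fListA (l.take j) ++ l.drop (j + 1)) := by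
        rw [fListA, if_neg hlen, hpiv]
        exact hstep
      rw [heq]
      -- decompose l = take j ++ pivot :: drop (j+1)
      have hdecomp : l = l.take j ++ l[j]'hjlt :: l.drop (j + 1) := by
        conv_lhs => rw [← List.take_append_drop j l]
        rw [List.drop_eq_getElem_cons hjlt]
      have hsmall : ∀ c ∈ l.drop (j + 1), c < pivot := by
        intro c hc
        obtain ⟨k, hk, hkv⟩ := List.mem_iff_getElem.mp hc
        have hkl : j + 1 + k < l.length := by
          have := List.length_drop (l := l) (i := j + 1); omega
        have hcval : l[j + 1 + k]'hkl = c := by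
          rw [← hkv]; exact (List.getElem_drop (xs := l)).symm
        have hne' : c ≠ pivot := by
          intro hcp
          exact hafter (j + 1 + k) (by omega) hkl
            (by rw [List.getElem?_eq_getElem hkl, hcval, hcp])
        exact lt_of_le_of_ne (hmax c (List.mem_of_mem_drop hc)) hne'
      -- compute B's fold along the decomposition
      have hcur := foldl_stepB_cur (l.take j) [] [] none
      rcases hst : (l.take j).foldl stepB ([], [], none) with ⟨r1, o1, cur1⟩
      rw [hst] at hcur
      have hrec : stepB (r1, o1, cur1) pivot = (r1 ++ [pivot], o1, some pivot) := by
        have hall : cur1.all (fun c => decide (c ≤ pivot)) = true := by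
          rcases hcur with h | ⟨c, hc, h⟩
          · simp at h; simp [h]
          · simp only at h; subst h
            simp [hmax c (List.mem_of_mem_take hc)]
        simp [stepB, hall]
      have hfold : l.foldl stepB ([], [], none) =
          (r1 ++ [pivot], o1 ++ l.drop (j + 1), some pivot) := by
        conv_lhs => rw [hdecomp]
        rw [List.foldl_append, List.foldl_cons, hjget, hst, hrec,
          foldl_stepB_small hsmall]
      rw [hfold]
      have hlt : (l.take j).length < l.length := by simp; omega
      have hih := ih (l.take j).length hlt (l.take j) rfl
      rw [hst] at hih
      simp only at hih
      rw [hih]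
      simp

-- ===== VERDICT (by name: the statement is the Claim_ definition above) =====
theorem f_spec : Claim_equal_f := by
  intro line _
  unfold Spec_f f f_alt
  rw [fListA_eq line.toList]
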